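-- pv_equiv track=rewrite | github.com/guylsmith1972/Aztec-Roguelike | Roguelike/Scratch/wfc.py | generate_constraints_from_sample
-- ===== SOURCE A (Python) =====
-- def generate_constraints_from_sample(sample):
--     """
--     Generates constraints based on a sample pattern.
--
--     Parameters:
--     - sample (list[list[int]]): 2D grid representing the sample pattern.
--
--     Returns:
--     - dict: Dictionary where each tile maps to its allowed neighbors.
--     """
--     constraints = {}
--     rows, cols = len(sample), len(sample[0])
--
--     for i in range(rows):
--         for j in range(cols):
--             tile = sample[i][j]
--             if tile not in constraints:
--                 constraints[tile] = {"R": [], "B": []}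
--
--             if j + 1 < cols and sample[i][j + 1] not in constraints[tile]["R"]:
--                 constraints[tile]["R"].append(sample[i][j + 1])
--
--             if i + 1 < rows and sample[i + 1][j] not in constraints[tile]["B"]:
--                 constraints[tile]["B"].append(sample[i + 1][j])
--
--     return constraints
-- ===== SOURCE B (Python) =====
-- def generate_constraints_from_sample(sample):
--     rows, cols = len(sample), len(sample[0])
--     occurrences = {}
--     for i in range(rows):
--         for j in range(cols):
--             occurrences.setdefault(sample[i][j], []).append((i, j))
--     return {
--         t: {
--             "R": list(dict.fromkeys(sample[i][j + 1] for i, j in cells if j + 1 < cols)),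
--             "B": list(dict.fromkeys(sample[i + 1][j] for i, j in cells if i + 1 < rows)),
--         }
--         for t, cells in occurrences.items()
--     }
-- ===== Notes on version B (the rewrite author's own statement) =====
-- stated objective: alternative
-- what changed: A accumulates the neighbor lists directly in one pass, scanning each tile's growing R/B list before every append; B instead builds an inverted index mapping each tile to the list of its occurrence positions (setdefault+append), then derives every tile's R/B lists from its positions in a dict comprehension with a single order-preserving dedup (dict.fromkeys) per list - the maintained data structure is a position index, not the neighbor lists themselves.
import Mathlib
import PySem

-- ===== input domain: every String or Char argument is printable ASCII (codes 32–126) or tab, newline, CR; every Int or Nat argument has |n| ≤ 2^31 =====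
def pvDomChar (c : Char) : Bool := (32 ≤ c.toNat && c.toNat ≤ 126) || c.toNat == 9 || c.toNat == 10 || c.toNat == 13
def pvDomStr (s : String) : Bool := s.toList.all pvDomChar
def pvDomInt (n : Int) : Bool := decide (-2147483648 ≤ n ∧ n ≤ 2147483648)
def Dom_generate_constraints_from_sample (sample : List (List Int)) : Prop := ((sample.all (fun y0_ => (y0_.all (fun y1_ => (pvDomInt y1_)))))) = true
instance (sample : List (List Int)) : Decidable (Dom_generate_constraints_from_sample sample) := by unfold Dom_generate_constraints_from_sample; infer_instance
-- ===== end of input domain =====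

-- B replaces A's membership-guarded accumulation of neighbor lists by an inverted index of
-- occurrence positions per tile, from which each tile's neighbor lists are derived and
-- deduplicated once: an alternative algorithm of similar cost.

-- ===== PORT A =====
-- Port of A. Python indexing sample[i][j] is ported as PySem.List.pyGetD with default;
-- exact wherever the index is in range, which Pre_ guarantees for every read A performs.
def generate_constraints_from_sample (sample : List (List Int)) : List (Int × List (String × List Int)) :=
  let rows : Int := sample.length
  let cols : Int := (PySem.List.pyGetD sample 0 []).length
  let constraints :=
    (PySem.List.pyRange 0 rows).foldl (fun (c : PySem.Dict Int (PySem.Dict String (List Int))) i =>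
      (PySem.List.pyRange 0 cols).foldl (fun c j =>
        let tile := PySem.List.pyGetD (PySem.List.pyGetD sample i []) j 0
        let c := if c.contains tile then c
                 else c.insert tile (PySem.Dict.ofList [("R", ([] : List Int)), ("B", ([] : List Int))])
        let c :=
          if j + 1 < cols then
            let nb := PySem.List.pyGetD (PySem.List.pyGetD sample i []) (j + 1) 0
            if nb ∈ (c.getD tile (PySem.Dict.empty : PySem.Dict String (List Int))).getD "R" [] then c
            else c.modify tile (PySem.Dict.empty : PySem.Dict String (List Int)) (fun inner => inner.modify "R" [] (fun l => l ++ [nb]))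
          else c
        if i + 1 < rows then
          let nb := PySem.List.pyGetD (PySem.List.pyGetD sample (i + 1) []) j 0
          if nb ∈ (c.getD tile (PySem.Dict.empty : PySem.Dict String (List Int))).getD "B" [] then c
          else c.modify tile (PySem.Dict.empty : PySem.Dict String (List Int)) (fun inner => inner.modify "B" [] (fun l => l ++ [nb]))
        else c) c)
      (PySem.Dict.empty : PySem.Dict Int (PySem.Dict String (List Int)))
  constraints.items.map (fun p => (p.1, p.2.items))


-- ===== PORT B =====
-- B: one pass builds an inverted index tile -> list of occurrence positions (setdefault+append
-- = Dict.modify with default []), then a dict comprehension derives each tile's deduplicated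
-- right/bottom neighbor lists from its positions (dict.fromkeys = PySem.List.dedup). The
-- comprehension re-keys by the index's keys, which are distinct, so its item list is the map below.
def generate_constraints_from_sample_alt (sample : List (List Int)) : List (Int × List (String × List Int)) :=
  let rows : Int := sample.length
  let cols : Int := (PySem.List.pyGetD sample 0 []).length
  let occurrences :=
    (PySem.List.pyRange 0 rows).foldl (fun (d : PySem.Dict Int (List (Int × Int))) i =>
      (PySem.List.pyRange 0 cols).foldl (fun d j =>
        d.modify (PySem.List.pyGetD (PySem.List.pyGetD sample i []) j 0) [] (fun l => l ++ [(i, j)])) d)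
      (PySem.Dict.empty : PySem.Dict Int (List (Int × Int)))
  occurrences.items.map (fun p =>
    (p.1, [("R", PySem.List.dedup ((p.2.filter (fun ij => decide (ij.2 + 1 < cols))).map
              (fun ij => PySem.List.pyGetD (PySem.List.pyGetD sample ij.1 []) (ij.2 + 1) 0))),
           ("B", PySem.List.dedup ((p.2.filter (fun ij => decide (ij.1 + 1 < rows))).map
              (fun ij => PySem.List.pyGetD (PySem.List.pyGetD sample (ij.1 + 1) []) ij.2 0)))]))

-- ===== PRECONDITION & SPEC =====
-- Pre_ excludes exactly the inputs where Python A raises IndexError: the empty grid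
-- (len(sample[0])) and ragged grids with some row shorter than the first row.
def Pre_generate_constraints_from_sample (sample : List (List Int)) : Prop :=
  sample ≠ [] ∧ ∀ row ∈ sample, sample.headI.length ≤ row.length

instance (sample : List (List Int)) : Decidable (Pre_generate_constraints_from_sample sample) := by
  unfold Pre_generate_constraints_from_sample; infer_instance

def pvWitness_generate_constraints_from_sample : List (List Int) := [[1, 2], [2, 1]]

def Spec_generate_constraints_from_sample (sample : List (List Int)) (out : List (Int × List (String × List Int))) : Prop :=
  out = generate_constraints_from_sample_alt sample

instance (sample : List (List Int)) (out : List (Int × List (String × List Int))) : Decidable (Spec_generate_constraints_from_sample sample out) := by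
  unfold Spec_generate_constraints_from_sample; infer_instance

-- ===== CLAIM (what is proved, stated in full; the proofs are below) =====
def Claim_equal_generate_constraints_from_sample : Prop := ∀ (sample : List (List Int)), Dom_generate_constraints_from_sample sample → Pre_generate_constraints_from_sample sample → Spec_generate_constraints_from_sample sample (generate_constraints_from_sample sample)

-- ===== LEMMAS AND PROOFS =====
-- Abstract cell record: (tile, optional right neighbor, optional bottom neighbor).
def pvStepA (c : PySem.Dict Int (PySem.Dict String (List Int))) (e : Int × Option Int × Option Int) :
    PySem.Dict Int (PySem.Dict String (List Int)) :=
  let c := if c.contains e.1 then c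
           else c.insert e.1 (PySem.Dict.ofList [("R", ([] : List Int)), ("B", ([] : List Int))])
  let c := match e.2.1 with
    | none => c
    | some nb =>
        if nb ∈ (c.getD e.1 (PySem.Dict.empty : PySem.Dict String (List Int))).getD "R" [] then c
        else c.modify e.1 (PySem.Dict.empty : PySem.Dict String (List Int))
               (fun inner => inner.modify "R" [] (fun l => l ++ [nb]))
  match e.2.2 with
    | none => c
    | some nb =>
        if nb ∈ (c.getD e.1 (PySem.Dict.empty : PySem.Dict String (List Int))).getD "B" [] then c
        else c.modify e.1 (PySem.Dict.empty : PySem.Dict String (List Int))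
               (fun inner => inner.modify "B" [] (fun l => l ++ [nb]))

def pvColR (E : List (Int × Option Int × Option Int)) (t : Int) : List Int :=
  (E.filter (fun e => e.1 == t)).filterMap (fun e => e.2.1)

def pvColB (E : List (Int × Option Int × Option Int)) (t : Int) : List Int :=
  (E.filter (fun e => e.1 == t)).filterMap (fun e => e.2.2)

def pvInner (rs bs : List Int) : PySem.Dict String (List Int) := PySem.Dict.mk [("R", rs), ("B", bs)]

def pvCols (sample : List (List Int)) : Int := ((PySem.List.pyGetD sample 0 []).length : Int)

def pvGrid (sample : List (List Int)) : List (List Int) :=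
  sample.map (fun row => PySem.List.slice row none (some (pvCols sample)))

def pvPij (n m : Int) : List (Int × Int) :=
  (PySem.List.pyRange 0 n).flatMap (fun i => (PySem.List.pyRange 0 m).map (fun j => (i, j)))

def pvRec (g : List (List Int)) (m : Int) (p : Int × Int) : Int × Option Int × Option Int :=
  (PySem.List.pyGetD (PySem.List.pyGetD g p.1 []) p.2 0,
   if p.2 + 1 < m then some (PySem.List.pyGetD (PySem.List.pyGetD g p.1 []) (p.2 + 1) 0) else none,
   if p.1 + 1 < (g.length : Int) then some (PySem.List.pyGetD (PySem.List.pyGetD g (p.1 + 1) []) p.2 0) else none)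

def pvE (sample : List (List Int)) : List (Int × Option Int × Option Int) :=
  (pvPij (sample.length : Int) (pvCols sample)).map (pvRec (pvGrid sample) (pvCols sample))

def pvTarget (sample : List (List Int)) : List (Int × List (String × List Int)) :=
  (PySem.List.dedup ((pvE sample).map (fun e => e.1))).map
    (fun t => (t, [("R", PySem.List.dedup (pvColR (pvE sample) t)),
                   ("B", PySem.List.dedup (pvColB (pvE sample) t))]))

lemma pvFoldlNested {α β σ : Type} (outer : List α) (inner : α → List β) (F : σ → α → β → σ) (init : σ) :
    outer.foldl (fun s a => (inner a).foldl (fun s b => F s a b) s) init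
      = (outer.flatMap (fun a => (inner a).map (fun b => (a, b)))).foldl (fun s p => F s p.1 p.2) init := by
  induction outer generalizing init with
  | nil => rfl
  | cons a l ih =>
    simp only [List.foldl_cons, List.flatMap_cons, List.foldl_append, List.foldl_map]
    exact ih _

lemma pvContains_mk {ν : Type} (ks : List Int) (g : Int → ν) (t0 : Int) :
    (PySem.Dict.mk (ks.map (fun t => (t, g t)))).contains t0 = decide (t0 ∈ ks) := by
  simp [PySem.Dict.contains, List.any_map, Function.comp_def, List.any_beq']

lemma pvGetD_mk {ν : Type} (ks : List Int) (g : Int → ν) (t0 : Int) (hnd : ks.Nodup) (ht : t0 ∈ ks) (d : ν) :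
    (PySem.Dict.mk (ks.map (fun t => (t, g t)))).getD t0 d = g t0 := by
  apply PySem.Dict.getD_of_mem_items
  · exact List.mem_map.mpr ⟨t0, ht, rfl⟩
  · simpa [PySem.Dict.keys_mk, List.map_map, Function.comp_def] using hnd

lemma pvInsert_mk_fresh {ν : Type} (ks : List Int) (g : Int → ν) (t0 : Int) (v : ν) (h : t0 ∉ ks) :
    (PySem.Dict.mk (ks.map (fun t => (t, g t)))).insert t0 v
      = PySem.Dict.mk (ks.map (fun t => (t, g t)) ++ [(t0, v)]) := by
  have hc : (PySem.Dict.mk (ks.map (fun t => (t, g t)))).contains t0 = false := by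
    rw [pvContains_mk]; simpa using h
  apply PySem.Dict.ext
  rw [PySem.Dict.items_insert_of_not_contains _ _ hc]

lemma pvModify_mk {ν : Type} (ks : List Int) (g : Int → ν) (t0 : Int) (d : ν) (f : ν → ν)
    (hnd : ks.Nodup) (ht : t0 ∈ ks) :
    (PySem.Dict.mk (ks.map (fun t => (t, g t)))).modify t0 d f
      = PySem.Dict.mk (ks.map (fun t => (t, if t = t0 then f (g t0) else g t))) := by
  have hc : (PySem.Dict.mk (ks.map (fun t => (t, g t)))).contains t0 = true := by
    rw [pvContains_mk]; simpa using ht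
  simp only [PySem.Dict.modify]
  rw [pvGetD_mk ks g t0 hnd ht]
  apply PySem.Dict.ext
  rw [PySem.Dict.items_insert_of_contains _ _ hc]
  show List.map _ (ks.map _) = _
  rw [List.map_map]
  apply List.map_congr_left
  intro t _
  by_cases h : t = t0
  · simp [h]
  · simp [h]

lemma pvInner_getD_R (rs bs : List Int) : (pvInner rs bs).getD "R" [] = rs := by rfl
lemma pvInner_getD_B (rs bs : List Int) : (pvInner rs bs).getD "B" [] = bs := by rfl
lemma pvInner_modify_R (rs bs : List Int) (f : List Int → List Int) :
    (pvInner rs bs).modify "R" [] f = pvInner (f rs) bs := by rfl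
lemma pvInner_modify_B (rs bs : List Int) (f : List Int → List Int) :
    (pvInner rs bs).modify "B" [] f = pvInner rs (f bs) := by rfl

lemma pvDedup_append (xs : List Int) (x : Int) :
    PySem.List.dedup (xs ++ [x]) = if x ∈ xs then PySem.List.dedup xs else PySem.List.dedup xs ++ [x] := by
  have hco : (PySem.Set.ofList xs).contains x = decide (x ∈ xs) := by
    simp [PySem.Set.mem_ofList]
  simp only [PySem.List.dedup, PySem.Set.ofList_append, PySem.Set.update, List.foldl_cons,
    List.foldl_nil, PySem.Set.add, hco]
  by_cases hx : x ∈ xs <;> simp [hx]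

lemma pvColR_append (E : List (Int × Option Int × Option Int)) (e : Int × Option Int × Option Int) (t : Int) :
    pvColR (E ++ [e]) t = pvColR E t ++ (if e.1 = t then e.2.1.toList else []) := by
  simp only [pvColR, List.filter_append, List.filterMap_append]
  congr 1
  by_cases he : e.1 = t
  · cases h2 : e.2.1 <;> simp [he, h2]
  · simp [he]

lemma pvColB_append (E : List (Int × Option Int × Option Int)) (e : Int × Option Int × Option Int) (t : Int) :
    pvColB (E ++ [e]) t = pvColB E t ++ (if e.1 = t then e.2.2.toList else []) := by
  simp only [pvColB, List.filter_append, List.filterMap_append]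
  congr 1
  by_cases he : e.1 = t
  · cases h2 : e.2.2 <;> simp [he, h2]
  · simp [he]

lemma pvColR_of_not_mem (E : List (Int × Option Int × Option Int)) (t : Int)
    (h : t ∉ E.map (fun e => e.1)) : pvColR E t = [] := by
  have hf : E.filter (fun e => e.1 == t) = [] := by
    rw [List.filter_eq_nil_iff]
    intro e he
    simp only [beq_iff_eq]
    intro hq
    exact h (List.mem_map.mpr ⟨e, he, hq⟩)
  simp [pvColR, hf]

lemma pvColB_of_not_mem (E : List (Int × Option Int × Option Int)) (t : Int)
    (h : t ∉ E.map (fun e => e.1)) : pvColB E t = [] := by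
  have hf : E.filter (fun e => e.1 == t) = [] := by
    rw [List.filter_eq_nil_iff]
    intro e he
    simp only [beq_iff_eq]
    intro hq
    exact h (List.mem_map.mpr ⟨e, he, hq⟩)
  simp [pvColB, hf]

lemma pvPhaseR (ks : List Int) (hnd : ks.Nodup) (t0 : Int) (ht : t0 ∈ ks)
    (rs bs : Int → List Int) (nb : Int) :
    (if nb ∈ ((PySem.Dict.mk (ks.map (fun t => (t, pvInner (PySem.List.dedup (rs t)) (PySem.List.dedup (bs t)))))).getD t0 (PySem.Dict.empty : PySem.Dict String (List Int))).getD "R" [] then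
        PySem.Dict.mk (ks.map (fun t => (t, pvInner (PySem.List.dedup (rs t)) (PySem.List.dedup (bs t)))))
      else
        (PySem.Dict.mk (ks.map (fun t => (t, pvInner (PySem.List.dedup (rs t)) (PySem.List.dedup (bs t)))))).modify t0
          (PySem.Dict.empty : PySem.Dict String (List Int))
          (fun inner => inner.modify "R" [] (fun l => l ++ [nb])))
    = PySem.Dict.mk (ks.map (fun t =>
        (t, pvInner (PySem.List.dedup (rs t ++ (if t0 = t then [nb] else []))) (PySem.List.dedup (bs t))))) := by
  rw [pvGetD_mk ks (fun t => pvInner (PySem.List.dedup (rs t)) (PySem.List.dedup (bs t))) t0 hnd ht]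
  rw [pvInner_getD_R]
  by_cases hnb : nb ∈ rs t0
  · rw [if_pos ((PySem.List.mem_dedup _ _).mpr hnb)]
    congr 1
    apply List.map_congr_left
    intro t _
    by_cases h : t0 = t
    · subst h; rw [if_pos rfl, pvDedup_append, if_pos hnb]
    · simp [h]
  · rw [if_neg (fun hm => hnb ((PySem.List.mem_dedup _ _).mp hm))]
    rw [pvModify_mk ks (fun t => pvInner (PySem.List.dedup (rs t)) (PySem.List.dedup (bs t))) t0 _ _ hnd ht]
    congr 1
    apply List.map_congr_left
    intro t _
    by_cases h : t = t0
    · subst h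
      rw [if_pos rfl, if_pos rfl, pvInner_modify_R, pvDedup_append, if_neg hnb]
    · rw [if_neg h, if_neg (fun hh => h hh.symm)]
      simp

lemma pvPhaseB (ks : List Int) (hnd : ks.Nodup) (t0 : Int) (ht : t0 ∈ ks)
    (rs bs : Int → List Int) (nb : Int) :
    (if nb ∈ ((PySem.Dict.mk (ks.map (fun t => (t, pvInner (PySem.List.dedup (rs t)) (PySem.List.dedup (bs t)))))).getD t0 (PySem.Dict.empty : PySem.Dict String (List Int))).getD "B" [] then
        PySem.Dict.mk (ks.map (fun t => (t, pvInner (PySem.List.dedup (rs t)) (PySem.List.dedup (bs t)))))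
      else
        (PySem.Dict.mk (ks.map (fun t => (t, pvInner (PySem.List.dedup (rs t)) (PySem.List.dedup (bs t)))))).modify t0
          (PySem.Dict.empty : PySem.Dict String (List Int))
          (fun inner => inner.modify "B" [] (fun l => l ++ [nb])))
    = PySem.Dict.mk (ks.map (fun t =>
        (t, pvInner (PySem.List.dedup (rs t)) (PySem.List.dedup (bs t ++ (if t0 = t then [nb] else [])))))) := by
  rw [pvGetD_mk ks (fun t => pvInner (PySem.List.dedup (rs t)) (PySem.List.dedup (bs t))) t0 hnd ht]
  rw [pvInner_getD_B]
  by_cases hnb : nb ∈ bs t0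
  · rw [if_pos ((PySem.List.mem_dedup _ _).mpr hnb)]
    congr 1
    apply List.map_congr_left
    intro t _
    by_cases h : t0 = t
    · subst h; rw [if_pos rfl, pvDedup_append, if_pos hnb]
    · simp [h]
  · rw [if_neg (fun hm => hnb ((PySem.List.mem_dedup _ _).mp hm))]
    rw [pvModify_mk ks (fun t => pvInner (PySem.List.dedup (rs t)) (PySem.List.dedup (bs t))) t0 _ _ hnd ht]
    congr 1
    apply List.map_congr_left
    intro t _
    by_cases h : t = t0
    · subst h
      rw [if_pos rfl, if_pos rfl, pvInner_modify_B, pvDedup_append, if_neg hnb]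
    · rw [if_neg h, if_neg (fun hh => h hh.symm)]
      simp

lemma pvMA (E : List (Int × Option Int × Option Int)) :
    E.foldl pvStepA (PySem.Dict.empty : PySem.Dict Int (PySem.Dict String (List Int)))
      = PySem.Dict.mk ((PySem.List.dedup (E.map (fun e => e.1))).map
          (fun t => (t, pvInner (PySem.List.dedup (pvColR E t)) (PySem.List.dedup (pvColB E t))))) := by
  induction E using List.reverseRecOn with
  | nil => rfl
  | append_singleton E e ih =>
    obtain ⟨t0, ro, bo⟩ := e
    rw [List.foldl_append, List.foldl_cons, List.foldl_nil, ih]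
    have hmapapp : ((E ++ [(t0, ro, bo)]).map (fun e => e.1)) = E.map (fun e => e.1) ++ [t0] := by simp
    have ht0 : t0 ∈ PySem.List.dedup ((E ++ [(t0, ro, bo)]).map (fun e => e.1)) :=
      (PySem.List.mem_dedup _ _).mpr (by simp)
    have hnd' : (PySem.List.dedup ((E ++ [(t0, ro, bo)]).map (fun e => e.1))).Nodup :=
      PySem.List.nodup_dedup _
    have hens :
        (if (PySem.Dict.mk ((PySem.List.dedup (E.map (fun e => e.1))).map
              (fun t => (t, pvInner (PySem.List.dedup (pvColR E t)) (PySem.List.dedup (pvColB E t)))))).contains t0 then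
           PySem.Dict.mk ((PySem.List.dedup (E.map (fun e => e.1))).map
              (fun t => (t, pvInner (PySem.List.dedup (pvColR E t)) (PySem.List.dedup (pvColB E t)))))
         else
           (PySem.Dict.mk ((PySem.List.dedup (E.map (fun e => e.1))).map
              (fun t => (t, pvInner (PySem.List.dedup (pvColR E t)) (PySem.List.dedup (pvColB E t)))))).insert t0
             (PySem.Dict.ofList [("R", ([] : List Int)), ("B", ([] : List Int))]))
        = PySem.Dict.mk ((PySem.List.dedup ((E ++ [(t0, ro, bo)]).map (fun e => e.1))).map
              (fun t => (t, pvInner (PySem.List.dedup (pvColR E t)) (PySem.List.dedup (pvColB E t))))) := by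
      rw [pvContains_mk]
      by_cases hmem : t0 ∈ E.map (fun e => e.1)
      · rw [if_pos (by simpa using (PySem.List.mem_dedup _ _).mpr hmem)]
        rw [hmapapp, pvDedup_append, if_pos hmem]
      · rw [if_neg (by simpa using fun hm => hmem ((PySem.List.mem_dedup _ _).mp hm))]
        rw [pvInsert_mk_fresh _ _ _ _ (fun hm => hmem ((PySem.List.mem_dedup _ _).mp hm))]
        rw [hmapapp, pvDedup_append, if_neg hmem, List.map_append]
        simp only [List.map_cons, List.map_nil]
        rw [pvColR_of_not_mem E t0 hmem, pvColB_of_not_mem E t0 hmem]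
        rfl
    cases ro with
    | none =>
      cases bo with
      | none =>
        simp only [pvStepA]
        rw [hens]
        simp only [pvColR_append, pvColB_append]
        simp
      | some nbB =>
        simp only [pvStepA]
        rw [hens]
        simp only [pvColR_append, pvColB_append]
        rw [pvPhaseB (PySem.List.dedup ((E ++ [(t0, (none : Option Int), some nbB)]).map (fun e => e.1)))
          hnd' t0 ht0 (fun t => pvColR E t) (fun t => pvColB E t) nbB]
        simp
    | some nbR =>
      cases bo with
      | none =>
        simp only [pvStepA]
        rw [hens]
        simp only [pvColR_append, pvColB_append]
        rw [pvPhaseR (PySem.List.dedup ((E ++ [(t0, some nbR, (none : Option Int))]).map (fun e => e.1)))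
          hnd' t0 ht0 (fun t => pvColR E t) (fun t => pvColB E t) nbR]
        simp
      | some nbB =>
        simp only [pvStepA]
        rw [hens]
        simp only [pvColR_append, pvColB_append]
        rw [pvPhaseR (PySem.List.dedup ((E ++ [(t0, some nbR, some nbB)]).map (fun e => e.1)))
          hnd' t0 ht0 (fun t => pvColR E t) (fun t => pvColB E t) nbR]
        rw [pvPhaseB (PySem.List.dedup ((E ++ [(t0, some nbR, some nbB)]).map (fun e => e.1)))
          hnd' t0 ht0 (fun t => pvColR E t ++ (if t0 = t then [nbR] else [])) (fun t => pvColB E t) nbB]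
        simp

lemma pvMem_pij {n m : Int} {p : Int × Int} (h : p ∈ pvPij n m) :
    0 ≤ p.1 ∧ p.1 < n ∧ 0 ≤ p.2 ∧ p.2 < m := by
  simp only [pvPij, List.mem_flatMap, List.mem_map, PySem.List.mem_pyRange_one] at h
  obtain ⟨i, hi, j, hj, rfl⟩ := h
  exact ⟨hi.1, hi.2, hj.1, hj.2⟩

lemma pvColsNonneg (sample : List (List Int)) : 0 ≤ pvCols sample := Int.natCast_nonneg _

lemma pvGridLen (sample : List (List Int)) :
    ((pvGrid sample).length : Int) = (sample.length : Int) := by simp [pvGrid]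

lemma pvRead (sample : List (List Int)) (i : Int) {j : Int} (hj : 0 ≤ j) (hj2 : j < pvCols sample) :
    PySem.List.pyGetD (PySem.List.pyGetD sample i []) j 0
      = PySem.List.pyGetD (PySem.List.pyGetD (pvGrid sample) i []) j 0 := by
  have hnil : PySem.List.slice ([] : List Int) none (some (pvCols sample)) = [] := by
    simp [PySem.List.slice]
  have hmap : PySem.List.pyGetD (pvGrid sample) i []
      = PySem.List.slice (PySem.List.pyGetD sample i []) none (some (pvCols sample)) := by
    conv_lhs => rw [pvGrid, ← hnil]
    exact PySem.List.pyGetD_map _ sample i []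
  rw [hmap, PySem.List.slice_to _ (pvColsNonneg sample)]
  rw [PySem.List.pyGetD_of_nonneg _ _ hj, PySem.List.pyGetD_of_nonneg _ _ hj]
  rw [List.getD_eq_getElem?_getD, List.getD_eq_getElem?_getD]
  rw [List.getElem?_take_of_lt (by omega)]

def pvBodyA (sample : List (List Int)) (c : PySem.Dict Int (PySem.Dict String (List Int))) (i j : Int) :
    PySem.Dict Int (PySem.Dict String (List Int)) :=
  let tile := PySem.List.pyGetD (PySem.List.pyGetD sample i []) j 0
  let c := if c.contains tile then c
           else c.insert tile (PySem.Dict.ofList [("R", ([] : List Int)), ("B", ([] : List Int))])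
  let c :=
    if j + 1 < pvCols sample then
      let nb := PySem.List.pyGetD (PySem.List.pyGetD sample i []) (j + 1) 0
      if nb ∈ (c.getD tile (PySem.Dict.empty : PySem.Dict String (List Int))).getD "R" [] then c
      else c.modify tile (PySem.Dict.empty : PySem.Dict String (List Int))
             (fun inner => inner.modify "R" [] (fun l => l ++ [nb]))
    else c
  if i + 1 < (sample.length : Int) then
    let nb := PySem.List.pyGetD (PySem.List.pyGetD sample (i + 1) []) j 0
    if nb ∈ (c.getD tile (PySem.Dict.empty : PySem.Dict String (List Int))).getD "B" [] then c
    else c.modify tile (PySem.Dict.empty : PySem.Dict String (List Int))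
           (fun inner => inner.modify "B" [] (fun l => l ++ [nb]))
  else c

lemma pvBodyA_eq (sample : List (List Int)) (p : Int × Int) (hp : p ∈ pvPij (sample.length : Int) (pvCols sample))
    (c : PySem.Dict Int (PySem.Dict String (List Int))) :
    pvBodyA sample c p.1 p.2 = pvStepA c (pvRec (pvGrid sample) (pvCols sample) p) := by
  obtain ⟨hi, hi2, hj, hj2⟩ := pvMem_pij hp
  obtain ⟨i, j⟩ := p
  simp only at hi hi2 hj hj2
  have htile := pvRead sample i hj hj2
  simp only [pvBodyA, pvStepA, pvRec, pvGridLen]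
  rw [htile]
  by_cases h1 : j + 1 < pvCols sample <;> by_cases h2 : i + 1 < (sample.length : Int)
  · rw [pvRead sample i (by omega) h1, pvRead sample (i + 1) hj hj2]
    simp [h1, h2]
  · rw [pvRead sample i (by omega) h1]
    simp [h1, h2]
  · rw [pvRead sample (i + 1) hj hj2]
    simp [h1, h2]
  · simp [h1, h2]

lemma pvA_unfold (sample : List (List Int)) :
    generate_constraints_from_sample sample
      = ((pvPij (sample.length : Int) (pvCols sample)).foldl
            (fun c p => pvBodyA sample c p.1 p.2)
            (PySem.Dict.empty : PySem.Dict Int (PySem.Dict String (List Int)))).items.map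
          (fun p => (p.1, p.2.items)) := by
  simp only [generate_constraints_from_sample]
  rw [pvFoldlNested]
  rfl

lemma pvFoldlMapStep (l : List (Int × Int)) (g : Int × Int → Int × Option Int × Option Int)
    (init : PySem.Dict Int (PySem.Dict String (List Int))) :
    l.foldl (fun c p => pvStepA c (g p)) init = (l.map g).foldl pvStepA init :=
  List.foldl_map.symm

lemma pvA_target (sample : List (List Int)) :
    generate_constraints_from_sample sample = pvTarget sample := by
  rw [pvA_unfold]
  have hfold : (pvPij (sample.length : Int) (pvCols sample)).foldl
        (fun c p => pvBodyA sample c p.1 p.2)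
        (PySem.Dict.empty : PySem.Dict Int (PySem.Dict String (List Int)))
      = (pvPij (sample.length : Int) (pvCols sample)).foldl
          (fun c p => pvStepA c (pvRec (pvGrid sample) (pvCols sample) p))
          (PySem.Dict.empty : PySem.Dict Int (PySem.Dict String (List Int))) :=
    PySem.List.foldl_congr_mem _ _ _ _ (fun acc x hx => pvBodyA_eq sample x hx acc)
  rw [hfold, pvFoldlMapStep, pvMA]
  simp only [pvTarget, pvE, pvInner]
  rw [List.map_map]
  rfl

lemma pvFilterMap_ite {α β : Type} (l : List α) (p : α → Prop) [DecidablePred p] (f : α → β) :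
    l.filterMap (fun a => if p a then some (f a) else none)
      = (l.filter (fun a => decide (p a))).map f := by
  induction l with
  | nil => rfl
  | cons a t ih => by_cases h : p a <;> simp [h, ih]

lemma pvColR_E (sample : List (List Int)) (t : Int) :
    ((((pvPij (sample.length : Int) (pvCols sample)).filter
          (fun ij => decide (ij.2 + 1 < pvCols sample))).map
        (fun ij => (PySem.List.pyGetD (PySem.List.pyGetD (pvGrid sample) ij.1 []) ij.2 0,
                    PySem.List.pyGetD (PySem.List.pyGetD (pvGrid sample) ij.1 []) (ij.2 + 1) 0))).filter
        (fun p => p.1 == t)).map (fun p => p.2)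
      = pvColR (pvE sample) t := by
  simp only [pvColR, pvE, List.filter_map, List.filterMap_map, List.map_map]
  have hco : ((fun e : Int × Option Int × Option Int => e.2.1) ∘ pvRec (pvGrid sample) (pvCols sample))
      = fun ij : Int × Int => if ij.2 + 1 < pvCols sample
          then some (PySem.List.pyGetD (PySem.List.pyGetD (pvGrid sample) ij.1 []) (ij.2 + 1) 0)
          else none := by funext ij; rfl
  rw [hco, pvFilterMap_ite]
  rw [List.filter_comm]
  rfl

lemma pvColB_E (sample : List (List Int)) (t : Int) :
    ((((pvPij (sample.length : Int) (pvCols sample)).filter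
          (fun ij => decide (ij.1 + 1 < ((pvGrid sample).length : Int)))).map
        (fun ij => (PySem.List.pyGetD (PySem.List.pyGetD (pvGrid sample) ij.1 []) ij.2 0,
                    PySem.List.pyGetD (PySem.List.pyGetD (pvGrid sample) (ij.1 + 1) []) ij.2 0))).filter
        (fun p => p.1 == t)).map (fun p => p.2)
      = pvColB (pvE sample) t := by
  simp only [pvColB, pvE, List.filter_map, List.filterMap_map, List.map_map]
  have hco : ((fun e : Int × Option Int × Option Int => e.2.2) ∘ pvRec (pvGrid sample) (pvCols sample))
      = fun ij : Int × Int => if ij.1 + 1 < ((pvGrid sample).length : Int)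
          then some (PySem.List.pyGetD (PySem.List.pyGetD (pvGrid sample) (ij.1 + 1) []) ij.2 0)
          else none := by funext ij; rfl
  rw [hco, pvFilterMap_ite]
  rw [List.filter_comm]
  rfl

def pvKeyS (sample : List (List Int)) (ij : Int × Int) : Int :=
  PySem.List.pyGetD (PySem.List.pyGetD sample ij.1 []) ij.2 0

-- The inverted index's item list: ordered distinct tiles, each with its row-major occurrence list.
lemma pvOcc_items (sample : List (List Int)) :
    ((pvPij (sample.length : Int) (pvCols sample)).foldl
        (fun (d : PySem.Dict Int (List (Int × Int))) ij =>
          d.modify (pvKeyS sample ij) [] (fun l => l ++ [ij]))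
        (PySem.Dict.empty : PySem.Dict Int (List (Int × Int)))).items
      = (PySem.List.dedup ((pvPij (sample.length : Int) (pvCols sample)).map (pvKeyS sample))).map
          (fun t => (t, (pvPij (sample.length : Int) (pvCols sample)).filter
              (fun ij => pvKeyS sample ij == t))) := by
  generalize pvPij (sample.length : Int) (pvCols sample) = l
  induction l using List.reverseRecOn with
  | nil => rfl
  | append_singleton l a ih =>
    rw [List.foldl_append, List.foldl_cons, List.foldl_nil]
    set d := l.foldl
        (fun (d : PySem.Dict Int (List (Int × Int))) ij =>
          d.modify (pvKeyS sample ij) [] (fun xs => xs ++ [ij]))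
        (PySem.Dict.empty : PySem.Dict Int (List (Int × Int))) with hd
    have hdict : d = PySem.Dict.mk ((PySem.List.dedup (l.map (pvKeyS sample))).map
        (fun t => (t, l.filter (fun ij => pvKeyS sample ij == t)))) := by
      apply PySem.Dict.ext; rw [ih]
    have hnd : (PySem.List.dedup (l.map (pvKeyS sample))).Nodup := PySem.List.nodup_dedup _
    rw [hdict]
    simp only [PySem.Dict.modify]
    by_cases hmem : pvKeyS sample a ∈ l.map (pvKeyS sample)
    · have htm : pvKeyS sample a ∈ PySem.List.dedup (l.map (pvKeyS sample)) :=
        (PySem.List.mem_dedup _ _).mpr hmem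
      rw [pvGetD_mk _ _ _ hnd htm]
      have hc : (PySem.Dict.mk ((PySem.List.dedup (l.map (pvKeyS sample))).map
          (fun t => (t, l.filter (fun ij => pvKeyS sample ij == t))))).contains (pvKeyS sample a) = true := by
        rw [pvContains_mk]; simpa using htm
      rw [PySem.Dict.items_insert_of_contains _ _ hc]
      have hmapapp : (l ++ [a]).map (pvKeyS sample) = l.map (pvKeyS sample) ++ [pvKeyS sample a] := by simp
      rw [hmapapp, pvDedup_append, if_pos hmem]
      show List.map _ ((PySem.List.dedup (l.map (pvKeyS sample))).map _) = _
      rw [List.map_map]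
      apply List.map_congr_left
      intro t _
      simp only [Function.comp_def, List.filter_append, List.filter_cons, List.filter_nil]
      by_cases h : pvKeyS sample a = t
      · simp [h]
      · have h2 : ¬ t = pvKeyS sample a := fun hh => h hh.symm
        simp [h, h2]
    · have hnm : pvKeyS sample a ∉ PySem.List.dedup (l.map (pvKeyS sample)) :=
        fun hm => hmem ((PySem.List.mem_dedup _ _).mp hm)
      have hc : (PySem.Dict.mk ((PySem.List.dedup (l.map (pvKeyS sample))).map
          (fun t => (t, l.filter (fun ij => pvKeyS sample ij == t))))).contains (pvKeyS sample a) = false := by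
        rw [pvContains_mk]; simpa using hnm
      rw [PySem.Dict.getD_of_not_contains _ _ hc]
      rw [PySem.Dict.items_insert_of_not_contains _ _ hc]
      have hmapapp : (l ++ [a]).map (pvKeyS sample) = l.map (pvKeyS sample) ++ [pvKeyS sample a] := by simp
      rw [hmapapp, pvDedup_append, if_neg hmem, List.map_append]
      show (PySem.List.dedup (l.map (pvKeyS sample))).map _ ++ _ = _
      congr 1
      · apply List.map_congr_left
        intro t ht
        simp only [List.filter_append, List.filter_cons, List.filter_nil]
        have h : pvKeyS sample a ≠ t := fun hh => hnm (hh ▸ ht)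
        simp [h]
      · simp only [List.map_cons, List.map_nil, List.filter_append, List.filter_cons,
          List.filter_nil, List.nil_append]
        have hfl : l.filter (fun ij => pvKeyS sample ij == pvKeyS sample a) = [] := by
          rw [List.filter_eq_nil_iff]
          intro ij hij hbeq
          exact hmem (List.mem_map.mpr ⟨ij, hij, by simpa using hbeq⟩)
        simp [hfl]

-- The keys B computes coincide with pvTarget's keys: sample reads equal grid reads on in-range cells.
lemma pvKeys_eq (sample : List (List Int)) :
    (pvPij (sample.length : Int) (pvCols sample)).map (pvKeyS sample)
      = (pvE sample).map (fun e => e.1) := by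
  simp only [pvE, List.map_map]
  apply List.map_congr_left
  intro ij hij
  obtain ⟨_, _, hj, hj2⟩ := pvMem_pij hij
  exact pvRead sample ij.1 hj hj2

lemma pvMapFilter_congr {A B : Type} (l : List A) (p q : A → Bool) (f g : A → B)
    (hpq : ∀ a ∈ l, p a = q a) (hfg : ∀ a ∈ l, q a = true → f a = g a) :
    (l.filter p).map f = (l.filter q).map g := by
  rw [List.filter_congr hpq]
  apply List.map_congr_left
  intro a ha
  rw [List.mem_filter] at ha
  exact hfg a ha.1 ha.2

lemma pvB_colR (sample : List (List Int)) (t : Int) :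
    (((pvPij (sample.length : Int) (pvCols sample)).filter (fun ij => pvKeyS sample ij == t)).filter
        (fun ij => decide (ij.2 + 1 < pvCols sample))).map
      (fun ij => PySem.List.pyGetD (PySem.List.pyGetD sample ij.1 []) (ij.2 + 1) 0)
    = pvColR (pvE sample) t := by
  rw [← pvColR_E sample t]
  rw [List.filter_map, List.map_map, List.filter_filter, List.filter_filter]
  apply pvMapFilter_congr
  · intro ij hij
    obtain ⟨_, _, hj, hj2⟩ := pvMem_pij hij
    simp only [pvKeyS, Function.comp_def]
    rw [pvRead sample ij.1 hj hj2]
    simp [Bool.and_comm]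
  · intro ij hij hcond
    simp only [Function.comp_def] at hcond ⊢
    have hj1 : ij.2 + 1 < pvCols sample := by
      simp only [Bool.and_eq_true, decide_eq_true_eq] at hcond
      exact hcond.2
    have := (pvMem_pij hij).2.2.1
    rw [pvRead sample ij.1 (by omega) hj1]

lemma pvB_colB (sample : List (List Int)) (t : Int) :
    (((pvPij (sample.length : Int) (pvCols sample)).filter (fun ij => pvKeyS sample ij == t)).filter
        (fun ij => decide (ij.1 + 1 < (sample.length : Int)))).map
      (fun ij => PySem.List.pyGetD (PySem.List.pyGetD sample (ij.1 + 1) []) ij.2 0)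
    = pvColB (pvE sample) t := by
  rw [← pvColB_E sample t]
  rw [List.filter_map, List.map_map, List.filter_filter, List.filter_filter, pvGridLen]
  apply pvMapFilter_congr
  · intro ij hij
    obtain ⟨_, _, hj, hj2⟩ := pvMem_pij hij
    simp only [pvKeyS, Function.comp_def]
    rw [pvRead sample ij.1 hj hj2]
    simp [Bool.and_comm]
  · intro ij hij _
    obtain ⟨_, _, hj, hj2⟩ := pvMem_pij hij
    simp only [Function.comp_def]
    rw [pvRead sample (ij.1 + 1) hj hj2]

lemma pvB_target (sample : List (List Int)) :
    generate_constraints_from_sample_alt sample = pvTarget sample := by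
  have h0 : generate_constraints_from_sample_alt sample
      = (((pvPij (sample.length : Int) (pvCols sample)).foldl
            (fun (d : PySem.Dict Int (List (Int × Int))) ij =>
              d.modify (pvKeyS sample ij) [] (fun l => l ++ [ij]))
            (PySem.Dict.empty : PySem.Dict Int (List (Int × Int)))).items).map (fun p =>
          (p.1, [("R", PySem.List.dedup ((p.2.filter (fun ij => decide (ij.2 + 1 < pvCols sample))).map
                    (fun ij => PySem.List.pyGetD (PySem.List.pyGetD sample ij.1 []) (ij.2 + 1) 0))),
                 ("B", PySem.List.dedup ((p.2.filter (fun ij => decide (ij.1 + 1 < (sample.length : Int)))).map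
                    (fun ij => PySem.List.pyGetD (PySem.List.pyGetD sample (ij.1 + 1) []) ij.2 0)))])) := by
    simp only [generate_constraints_from_sample_alt]
    rw [pvFoldlNested]
    rfl
  rw [h0, pvOcc_items, List.map_map, pvKeys_eq]
  simp only [pvTarget]
  apply List.map_congr_left
  intro t _
  simp only [Function.comp_def]
  rw [pvB_colR sample t, pvB_colB sample t]

-- ===== VERDICT (by name: the statement is the Claim_ definition above) =====
theorem generate_constraints_from_sample_spec : Claim_equal_generate_constraints_from_sample := by
  intro sample _ _
  unfold Spec_generate_constraints_from_sample
  rw [pvA_target sample, pvB_target sample]
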